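-- pv_equiv track=rewrite | github.com/kailasbk/pokerbots-21 | cards.py | highest_flush
-- ===== SOURCE A (Python) =====
-- SUITS = {'h', 'd', 's', 'c'}
--
-- NONE = str('0')
--
-- cton = {
-- 	'2': 2,
-- 	'3': 3,
-- 	'4': 4,
-- 	'5': 5,
-- 	'6': 6,
-- 	'7': 7,
-- 	'8': 8,
-- 	'9': 9,
-- 	'T': 10,
-- 	'J': 11,
-- 	'Q': 12,
-- 	'K': 13,
-- 	'A': 14,
-- }
--
-- def highest_flush(cards: list) -> str:
-- 	highest = NONE
--
-- 	for suit in SUITS: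
-- 		count = 0
-- 		potential = '2'
-- 		for card in cards:
-- 			if card[1] == suit:
-- 				count += 1
-- 				if cton[potential] < cton[card[0]]:
-- 					potential = card[0]
--
-- 		if count >= 5:
-- 			highest = potential
--
-- 	return highest
-- ===== SOURCE B (Python) =====
-- SUITS = {'h', 'd', 's', 'c'}
--
-- NONE = str('0')
--
-- cton = {
-- 	'2': 2, '3': 3, '4': 4, '5': 5, '6': 6, '7': 7, '8': 8,
-- 	'9': 9, 'T': 10, 'J': 11, 'Q': 12, 'K': 13, 'A': 14,
-- }
--
-- def highest_flush(cards: list) -> str: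
-- 	stats = {}  # suit -> (count, best rank char so far)
-- 	for card in cards:
-- 		s = card[1]
-- 		if s in SUITS:
-- 			count, best = stats.get(s, (0, '2'))
-- 			if cton[best] < cton[card[0]]:
-- 				best = card[0]
-- 			stats[s] = (count + 1, best)
-- 	for count, best in stats.values():
-- 		if count >= 5:
-- 			return best
-- 	return NONE
-- ===== Notes on version B (the rewrite author's own statement) =====
-- stated objective: alternative
-- what changed: A runs one counting/max pass over the card list per suit (four passes) and keeps the last qualifying suit; B makes a single pass that maintains a dict suit -> (count, best rank) and then scans the dict values for a suit with 5+ cards.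
-- outside the precondition, e.g. on highest_flush(['Ah', 'Kh', 'Qh', 'Jh', 'Th', 'Ad', 'Kd', 'Qd', 'Jd', 'Td']): A returns 'A', B returns 'A'
import Mathlib
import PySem

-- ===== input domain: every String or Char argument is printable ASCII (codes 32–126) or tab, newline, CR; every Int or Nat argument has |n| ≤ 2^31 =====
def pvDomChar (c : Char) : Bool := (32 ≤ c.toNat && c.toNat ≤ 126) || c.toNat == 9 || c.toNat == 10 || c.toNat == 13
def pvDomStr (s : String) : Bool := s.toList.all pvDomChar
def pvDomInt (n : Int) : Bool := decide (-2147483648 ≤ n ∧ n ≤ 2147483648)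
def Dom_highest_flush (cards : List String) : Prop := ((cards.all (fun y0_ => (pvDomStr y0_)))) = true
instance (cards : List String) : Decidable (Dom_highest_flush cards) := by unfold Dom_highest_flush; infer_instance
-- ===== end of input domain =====

-- B replaces A's four per-suit passes over the card list by ONE pass that maintains a
-- dict suit -> (count, best rank) and then scans its values (objective: alternative).

-- shared module constants: SUITS (as the literal list of its members) and the cton table
def pvSuits : List Char := ['h', 'd', 's', 'c']

def pvCton : PySem.Dict Char Int :=
  PySem.Dict.mk [('2', 2), ('3', 3), ('4', 4), ('5', 5), ('6', 6), ('7', 7), ('8', 8),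
                 ('9', 9), ('T', 10), ('J', 11), ('Q', 12), ('K', 13), ('A', 14)]

-- card[0] and card[1] (in-range under Pre_, where Python's IndexError cannot fire)
def pvC0 (card : String) : Char := (PySem.Str.pyGet? card 0).getD ' '
def pvC1 (card : String) : Char := (PySem.Str.pyGet? card 1).getD ' '

-- cton[c] (a hit under Pre_, where Python's KeyError cannot fire)
def pvRank (c : Char) : Int := pvCton.getD c 0

-- ===== PORT A =====
-- body of A's inner 'for card in cards' loop, state = (count, potential)
def pvStepA (suit : Char) (st : Int × Char) (card : String) : Int × Char :=
  if pvC1 card = suit then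
    (st.1 + 1, if pvRank st.2 < pvRank (pvC0 card) then pvC0 card else st.2)
  else st

def highest_flush (cards : List String) : String :=
  pvSuits.foldl (fun highest suit =>
    let st := cards.foldl (pvStepA suit) (0, '2')
    if 5 ≤ st.1 then String.ofList [st.2] else highest) "0"

-- ===== PORT B =====
-- body of B's single 'for card in cards' loop over the dict suit -> (count, best)
def pvStepB (d : PySem.Dict Char (Int × Char)) (card : String) : PySem.Dict Char (Int × Char) :=
  let s := pvC1 card
  if s ∈ pvSuits then
    let cb := d.getD s (0, '2')
    let best := if pvRank cb.2 < pvRank (pvC0 card) then pvC0 card else cb.2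
    d.insert s (cb.1 + 1, best)
  else d

def highest_flush_alt (cards : List String) : String :=
  let stats := cards.foldl pvStepB (PySem.Dict.mk [])
  match stats.values.find? (fun v => 5 ≤ v.1) with
  | some v => String.ofList [v.2]
  | none => "0"

-- ===== PRECONDITION & SPEC =====
-- number of cards of suit s (used only to state Pre_)
def pvCnt (cards : List String) (s : Char) : Nat :=
  cards.countP (fun card => pvC1 card == s)

-- Pre_ excludes (a) cards shorter than 2 chars and suited cards with a rank character
-- outside cton, on which A raises IndexError/KeyError, and (b) inputs where two or more
-- suits hold 5+ cards, on which the flush A reports depends on Python's hash-randomized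
-- set iteration order over SUITS, so A's value there is accidental.
def Pre_highest_flush (cards : List String) : Prop :=
  (cards.all (fun card =>
      decide (2 ≤ card.toList.length) &&
      (!(pvSuits.contains (pvC1 card)) || pvRank (pvC0 card) != 0))) = true ∧
  (pvSuits.all (fun s => pvSuits.all (fun t =>
      !(decide (5 ≤ pvCnt cards s)) || !(decide (5 ≤ pvCnt cards t)) || s == t))) = true
instance (cards : List String) : Decidable (Pre_highest_flush cards) := by
  unfold Pre_highest_flush; infer_instance

def pvWitness_highest_flush : List String := ["Ah", "Kh", "Qh", "Jh", "7h", "2c"]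

def Spec_highest_flush (cards : List String) (out : String) : Prop := out = highest_flush_alt cards
instance (cards : List String) (out : String) : Decidable (Spec_highest_flush cards out) := by unfold Spec_highest_flush; infer_instance

-- ===== CLAIM (what is proved, stated in full; the proofs are below) =====
def Claim_equal_highest_flush : Prop := ∀ (cards : List String), Dom_highest_flush cards → Pre_highest_flush cards → Spec_highest_flush cards (highest_flush cards)

-- ===== LEMMAS AND PROOFS =====

-- A's inner loop counts the cards of its suit in its first component
theorem foldA_fst (cards : List String) (suit : Char) (st : Int × Char) :
    (cards.foldl (pvStepA suit) st).1 = st.1 + (pvCnt cards suit : Int) := by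
  induction cards generalizing st with
  | nil => simp [pvCnt]
  | cons card rest ih =>
    simp only [List.foldl_cons, ih, pvCnt, List.countP_cons]
    by_cases h : pvC1 card = suit <;> simp [pvStepA, h] <;> ring

-- B's dict entry for a suit is exactly A's inner loop run from that entry
theorem foldB_getD (cards : List String) (d : PySem.Dict Char (Int × Char))
    (s : Char) (hs : s ∈ pvSuits) :
    (cards.foldl pvStepB d).getD s (0, '2') =
      cards.foldl (pvStepA s) (d.getD s (0, '2')) := by
  induction cards generalizing d with
  | nil => rfl
  | cons card rest ih =>
    simp only [List.foldl_cons]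
    rw [ih]
    congr 1
    by_cases h1 : pvC1 card ∈ pvSuits
    · by_cases h2 : s = pvC1 card
      · subst h2
        simp [pvStepB, pvStepA, h1]
      · simp [pvStepB, pvStepA, h1, PySem.Dict.getD_insert, h2, Ne.symm h2]
    · have hne : pvC1 card ≠ s := fun h => h1 (h ▸ hs)
      simp [pvStepB, pvStepA, h1, hne]

-- every key of B's dict is a suit
theorem foldB_keys (cards : List String) (d : PySem.Dict Char (Int × Char))
    (k : Char) (hk : k ∈ (cards.foldl pvStepB d).keys) : k ∈ pvSuits ∨ k ∈ d.keys := by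
  induction cards generalizing d with
  | nil => exact Or.inr hk
  | cons card rest ih =>
    simp only [List.foldl_cons] at hk
    rcases ih _ hk with h | h
    · exact Or.inl h
    · by_cases h1 : pvC1 card ∈ pvSuits
      · simp only [pvStepB, if_pos h1] at h
        rcases (PySem.Dict.mem_keys_insert _ _ _ _).1 h with h2 | h2
        · exact Or.inl (h2 ▸ h1)
        · exact Or.inr h2
      · simpa [pvStepB, h1] using Or.inr h

-- B's dict keeps distinct keys
theorem foldB_nodup (cards : List String) (d : PySem.Dict Char (Int × Char))
    (hd : d.keys.Nodup) : (cards.foldl pvStepB d).keys.Nodup := by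
  induction cards generalizing d with
  | nil => exact hd
  | cons card rest ih =>
    simp only [List.foldl_cons]
    apply ih
    by_cases h1 : pvC1 card ∈ pvSuits
    · simpa [pvStepB, h1] using PySem.Dict.nodup_keys_insert _ _ _ hd
    · simpa [pvStepB, h1] using hd

-- ===== VERDICT (by name: the statement is the Claim_ definition above) =====
-- the dict B builds is empty-rooted: its entries and lookups reduce to A's inner folds
theorem stats_values (cards : List String) (v : Int × Char)
    (hv : v ∈ (cards.foldl pvStepB (PySem.Dict.mk [])).values) :
    ∃ k ∈ pvSuits, v = cards.foldl (pvStepA k) (0, '2') := by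
  obtain ⟨⟨k, w⟩, hmem, hw⟩ := List.mem_map.1 hv
  have hkkeys : k ∈ (cards.foldl pvStepB (PySem.Dict.mk [])).keys :=
    PySem.Dict.mem_keys_of_mem_items _ hmem
  have hks : k ∈ pvSuits := by
    rcases foldB_keys cards _ k hkkeys with h | h
    · exact h
    · simp [PySem.Dict.keys_mk] at h
  refine ⟨k, hks, ?_⟩
  have hnd : (cards.foldl pvStepB (PySem.Dict.mk [])).keys.Nodup := by
    apply foldB_nodup; simp [PySem.Dict.keys_mk]
  have := PySem.Dict.getD_of_mem_items _ hmem hnd ((0 : Int), '2')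
  rw [foldB_getD cards _ k hks,
    show (PySem.Dict.mk ([] : List (Char × (Int × Char)))).getD k ((0 : Int), '2') =
      ((0 : Int), '2') from rfl] at this
  simpa [← hw] using this.symm

theorem stats_hit (cards : List String) (s : Char) (hs : s ∈ pvSuits)
    (h5 : 5 ≤ pvCnt cards s) :
    ∃ v ∈ (cards.foldl pvStepB (PySem.Dict.mk [])).values,
      v = cards.foldl (pvStepA s) (0, '2') := by
  have hgetD : (cards.foldl pvStepB (PySem.Dict.mk [])).getD s (0, '2') =
      cards.foldl (pvStepA s) (0, '2') := foldB_getD cards _ s hs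
  cases hget : (cards.foldl pvStepB (PySem.Dict.mk [])).get? s with
  | none =>
    exfalso
    have : (cards.foldl pvStepB (PySem.Dict.mk [])).getD s (0, '2') = (0, '2') :=
      PySem.Dict.getD_of_get?_eq_none _ _ hget
    rw [hgetD] at this
    have hfst := foldA_fst cards s ((0 : Int), '2')
    rw [this] at hfst
    omega
  | some v =>
    have hitems := PySem.Dict.mem_items_of_get?_eq_some _ hget
    refine ⟨v, List.mem_map.2 ⟨(s, v), hitems, rfl⟩, ?_⟩
    have := PySem.Dict.getD_of_get?_eq_some _ ((0 : Int), '2') hget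
    rw [hgetD] at this; exact this.symm

-- ===== VERDICT (by name: the statement is the Claim_ definition above) =====
theorem highest_flush_spec : Claim_equal_highest_flush := by
  intro cards _ hpre
  obtain ⟨-, hpre2⟩ := hpre
  have huniq : ∀ s ∈ pvSuits, ∀ t ∈ pvSuits,
      5 ≤ pvCnt cards s → 5 ≤ pvCnt cards t → s = t := by
    simp only [List.all_eq_true, Bool.or_eq_true, Bool.not_eq_true',
      decide_eq_false_iff_not, beq_iff_eq] at hpre2
    intro s hs t ht h5s h5t
    rcases hpre2 s hs t ht with (h | h) | h
    · exact absurd h5s h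
    · exact absurd h5t h
    · exact h
  unfold Spec_highest_flush highest_flush highest_flush_alt
  cases hf : (cards.foldl pvStepB (PySem.Dict.mk [])).values.find?
      (fun v => decide (5 ≤ v.1)) with
  | none =>
    have hnone := List.find?_eq_none.mp hf
    have hlow : ∀ s ∈ pvSuits, ¬ (5 ≤ pvCnt cards s) := by
      intro s hs h5
      obtain ⟨v, hv, hveq⟩ := stats_hit cards s hs h5
      have hfst := foldA_fst cards s ((0 : Int), '2')
      rw [← hveq] at hfst
      exact absurd (by simpa using hnone v hv) (by simp; omega)
    have hh := hlow 'h' (by simp [pvSuits])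
    have hd := hlow 'd' (by simp [pvSuits])
    have hs := hlow 's' (by simp [pvSuits])
    have hc := hlow 'c' (by simp [pvSuits])
    simp only [pvSuits, List.foldl_cons, List.foldl_nil, hf, foldA_fst]
    rw [if_neg (by omega), if_neg (by omega), if_neg (by omega), if_neg (by omega)]
  | some v =>
    have hv1 : 5 ≤ v.1 := by simpa using List.find?_some hf
    have hv2 := List.mem_of_find?_eq_some hf
    obtain ⟨k, hks, hkeq⟩ := stats_values cards v hv2
    have hk5 : 5 ≤ pvCnt cards k := by
      have hfst := foldA_fst cards k ((0 : Int), '2')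
      rw [← hkeq] at hfst; omega
    have honly : ∀ t ∈ pvSuits, 5 ≤ pvCnt cards t → t = k := fun t ht h5 =>
      huniq t ht k hks h5 hk5
    have hcond : ∀ t ∈ pvSuits, (5 ≤ pvCnt cards t) ↔ t = k := by
      intro t ht
      exact ⟨fun h => honly t ht h, fun h => h ▸ hk5⟩
    simp only [pvSuits, List.foldl_cons, List.foldl_nil, hf, foldA_fst]
    rw [hkeq]
    simp only [List.mem_cons, List.not_mem_nil, or_false, pvSuits] at hks
    rcases hks with rfl | rfl | rfl | rfl <;>
      simp [hcond 'c' (by simp [pvSuits]), hcond 's' (by simp [pvSuits]),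
        hcond 'd' (by simp [pvSuits]), hcond 'h' (by simp [pvSuits])]
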